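-- pv_equiv track=rewrite | github.com/galtay/legisplain | legisplain/chunking_bge.py | _find_word_boundary_backwards
-- ===== SOURCE A (Python) =====
-- def _find_word_boundary_backwards(text: str, target_pos: int) -> int:
--     """
--     Find the nearest word boundary by searching backwards from target position.
--     A word boundary is defined as whitespace (including newlines) or beginning/end of string.
--
--     Args:
--         text: The text to search in
--         target_pos: The target position to search backwards from
--
--     Returns:
--         Position where chunk should end (exclusive for slicing)
--     """
--     if target_pos >= len(text):
--         return len(text)
--
--     if target_pos <= 0:
--         return 0
--
--     # Search backwards for whitespace (includes spaces, tabs, newlines, etc.)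
--     for i in range(target_pos - 1, -1, -1):
--         if text[i].isspace():
--             # Found whitespace, return position after it (end of previous word)
--             return i + 1
--
--     # If no whitespace found, return beginning of text
--     return 0
-- ===== SOURCE B (Python) =====
-- def _find_word_boundary_backwards(text: str, target_pos: int) -> int:
--     """Single forward pass: remember the last whitespace position before target_pos."""
--     if target_pos >= len(text):
--         return len(text)
--
--     if target_pos <= 0:
--         return 0
--
--     last = None
--     for i, ch in enumerate(text[:target_pos]):
--         if ch.isspace():
--             last = i
--
--     return 0 if last is None else last + 1
-- ===== Notes on version B (the rewrite author's own statement) =====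
-- stated objective: alternative
-- what changed: A scans backwards from target_pos-1 and returns at the first whitespace; B makes one forward pass over text[:target_pos] with enumerate, remembering the last whitespace index, and returns last+1 (or 0 if none).
import Mathlib
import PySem

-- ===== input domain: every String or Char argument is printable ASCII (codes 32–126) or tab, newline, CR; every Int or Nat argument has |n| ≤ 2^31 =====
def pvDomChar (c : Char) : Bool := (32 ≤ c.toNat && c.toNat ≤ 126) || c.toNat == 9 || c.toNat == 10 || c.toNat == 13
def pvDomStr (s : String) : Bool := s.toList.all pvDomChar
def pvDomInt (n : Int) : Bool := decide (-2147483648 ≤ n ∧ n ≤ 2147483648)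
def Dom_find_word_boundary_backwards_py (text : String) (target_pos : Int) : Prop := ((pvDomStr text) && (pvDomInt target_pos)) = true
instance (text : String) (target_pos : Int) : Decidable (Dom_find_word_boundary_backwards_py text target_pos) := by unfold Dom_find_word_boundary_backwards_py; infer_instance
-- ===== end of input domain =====

-- B replaces A's backward scan for the first whitespace by a single forward pass that
-- remembers the last whitespace position before target_pos (objective: alternative decomposition, same cost).

-- ===== PORT A =====
-- A's backward loop `for i in range(target_pos - 1, -1, -1)`: first whitespace found returns i+1.
def pvALoopA (text : String) : List Int → Int
  | [] => 0
  | i :: rest =>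
    if ((PySem.Str.pyGet? text i).map PySem.Chars.isspace).getD false then i + 1
    else pvALoopA text rest

def find_word_boundary_backwards_py (text : String) (target_pos : Int) : Int :=
  if target_pos ≥ PySem.Str.len text then PySem.Str.len text
  else if target_pos ≤ 0 then 0
  else pvALoopA text (PySem.List.pyRange (target_pos - 1) (-1) (-1))

-- ===== PORT B =====
-- Source B's forward pass over enumerate(text[:target_pos]) tracking the last whitespace index.
def pvBCore (p : List Char) : Int :=
  let last := (PySem.List.enumerate p 0).foldl
    (fun last q => if PySem.Chars.isspace q.2 then some q.1 else last) (none : Option Int)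
  match last with
  | none => 0
  | some i => i + 1

def find_word_boundary_backwards_py_alt (text : String) (target_pos : Int) : Int :=
  if target_pos ≥ PySem.Str.len text then PySem.Str.len text
  else if target_pos ≤ 0 then 0
  else pvBCore (PySem.Str.slice text none (some target_pos)).toList

-- ===== PRECONDITION & SPEC =====
def Spec_find_word_boundary_backwards_py (text : String) (target_pos : Int) (out : Int) : Prop := out = find_word_boundary_backwards_py_alt text target_pos
instance (text : String) (target_pos : Int) (out : Int) : Decidable (Spec_find_word_boundary_backwards_py text target_pos out) := by unfold Spec_find_word_boundary_backwards_py; infer_instance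

-- ===== CLAIM (what is proved, stated in full; the proofs are below) =====
def Claim_equal_find_word_boundary_backwards_py : Prop := ∀ (text : String) (target_pos : Int), Dom_find_word_boundary_backwards_py text target_pos → Spec_find_word_boundary_backwards_py text target_pos (find_word_boundary_backwards_py text target_pos)

-- ===== LEMMAS AND PROOFS =====

-- B's fold appends: the last element decides, else fall through to the prefix.
theorem pvBCore_append (q : List Char) (c : Char) :
    pvBCore (q ++ [c]) =
      if PySem.Chars.isspace c then (q.length : Int) + 1 else pvBCore q := by
  unfold pvBCore
  rw [PySem.List.enumerate_append, List.foldl_append]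
  simp only [PySem.List.enumerate, List.foldl_cons, List.foldl_nil, zero_add]
  by_cases h : PySem.Chars.isspace c <;> simp [h]

-- Key invariant: scanning backwards from index m equals B's forward pass on take (m+1).
theorem pvKey (text : String) (m : Nat) (h : m < text.toList.length) :
    pvALoopA text (PySem.List.pyRange (m : Int) (-1) (-1)) =
      pvBCore (text.toList.take (m + 1)) := by
  induction m with
  | zero =>
    have hg : text.toList[0]? = some text.toList[0] := List.getElem?_eq_getElem h
    have hget : PySem.Str.pyGet? text ((0 : Nat) : Int) = some text.toList[0] := by
      rw [PySem.Str.pyGet?_natCast]; exact hg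
    have hc : PySem.List.pyRange ((0 : Nat) : Int) (-1) (-1) = [((0 : Nat) : Int)] := by
      rw [PySem.List.pyRange_neg_one_cons (by omega),
          PySem.List.pyRange_neg_one_eq_nil (by omega)]
    rw [hc, List.take_add_one, List.take_zero, List.nil_append, hg, Option.toList_some]
    simp only [pvALoopA, hget, Option.map_some, Option.getD_some]
    by_cases hs : PySem.Chars.isspace text.toList[0] <;>
      simp [hs, pvBCore, PySem.List.enumerate]
  | succ k ih =>
    have hg : text.toList[k + 1]? = some text.toList[k + 1] := List.getElem?_eq_getElem h
    have hget : PySem.Str.pyGet? text ((k + 1 : Nat) : Int) = some text.toList[k + 1] := by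
      rw [PySem.Str.pyGet?_natCast]; exact hg
    have hlen : (text.toList.take (k + 1)).length = k + 1 := by
      rw [List.length_take]; omega
    rw [PySem.List.pyRange_neg_one_cons (by omega), List.take_add_one, hg, Option.toList_some]
    simp only [pvALoopA, hget, Option.map_some, Option.getD_some]
    by_cases hs : PySem.Chars.isspace text.toList[k + 1]
    · rw [if_pos hs, pvBCore_append, if_pos hs, hlen]
      try push_cast
      try ring
    · rw [if_neg hs, pvBCore_append, if_neg hs]
      rw [show ((k + 1 : Nat) : Int) - 1 = ((k : Nat) : Int) by push_cast; ring]
      exact ih (by omega)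

-- ===== VERDICT (by name: the statement is the Claim_ definition above) =====
theorem find_word_boundary_backwards_py_spec : Claim_equal_find_word_boundary_backwards_py := by
  intro text target_pos _
  unfold Spec_find_word_boundary_backwards_py
  unfold find_word_boundary_backwards_py find_word_boundary_backwards_py_alt
  by_cases h1 : target_pos ≥ PySem.Str.len text
  · have h1' : (text.length : Int) ≤ target_pos := by simpa using h1
    simp [h1']
  · rw [if_neg h1, if_neg h1]
    by_cases h2 : target_pos ≤ 0
    · simp [h2]
    · rw [if_neg h2, if_neg h2]
      have hTL : text.toList.length = text.length := by simp
      have hlt : target_pos < (text.toList.length : Int) := by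
        have : ¬ ((text.length : Int) ≤ target_pos) := by simpa using h1
        omega
      have hpos : 0 < target_pos := by omega
      rw [PySem.Str.toList_slice, PySem.Chars.slice_eq_listSlice,
          PySem.List.slice_to text.toList (show (0 : Int) ≤ target_pos by omega)]
      set m : Nat := (target_pos - 1).toNat with hmdef
      have e1 : target_pos - 1 = (m : Int) := by omega
      have e2 : target_pos.toNat = m + 1 := by omega
      rw [e1, e2]
      exact pvKey text m (by omega)
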